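-- pv_equiv track=rewrite | github.com/rodriguez-malena/Ejercicios_python | CEREALES.py | deposito_mayor_recaudacion
-- ===== SOURCE A (Python) =====
-- def deposito_mayor_recaudacion(matrix:list,precio_kg:int,nombre_cereal:list)->list:
--     """Depósito con mayor recaudación, teniendo en cuenta que disponemos
-- de un vector con los valores por kilo de cada tipo de cereal."""
--     recaudaciones = [0] * len(matrix)
--
--     for i in range(len(matrix)):
--         for j in range(len(matrix[0])):
--             recaudaciones [i] += matrix[i][j] * precio_kg[j]
--
--     maxima_recaudacion = 0
--     bandera_maxima = True
--     deposito = 0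
--     mayor_recaudacion = []
--
--     for i in range(len(recaudaciones)):
--         if recaudaciones[i] > maxima_recaudacion or bandera_maxima:
--             maxima_recaudacion = recaudaciones[i]
--             bandera_maxima = False
--             deposito = i
--         mayor_recaudacion = [deposito,maxima_recaudacion]
--     return mayor_recaudacion
-- ===== SOURCE B (Python) =====
-- def deposito_mayor_recaudacion(matrix: list, precio_kg: int, nombre_cereal: list) -> list:
--     """Deposito con mayor recaudacion via ordenacion: empareja cada indice con
--     su recaudacion (zip de la fila recortada con los precios), ordena por
--     recaudacion descendente (orden estable: empates conservan el indice menor)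
--     y toma el primer par."""
--     if not matrix:
--         return []
--     cols = len(matrix[0])
--     filas = [(i, sum(x * p for x, p in zip(fila[:cols], precio_kg)))
--              for i, fila in enumerate(matrix)]
--     mejor = sorted(filas, key=lambda t: t[1], reverse=True)[0]
--     return [mejor[0], mejor[1]]
-- ===== Notes on version B (the rewrite author's own statement) =====
-- stated objective: alternative
-- what changed: Replaces A's accumulation array plus flag-driven argmax scan by a sort-based selection: build (index, revenue) pairs (revenue via zip of the sliced row with the prices), stable-sort them by revenue descending and take the first pair, whose stability gives the earliest index on ties.
import Mathlib
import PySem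

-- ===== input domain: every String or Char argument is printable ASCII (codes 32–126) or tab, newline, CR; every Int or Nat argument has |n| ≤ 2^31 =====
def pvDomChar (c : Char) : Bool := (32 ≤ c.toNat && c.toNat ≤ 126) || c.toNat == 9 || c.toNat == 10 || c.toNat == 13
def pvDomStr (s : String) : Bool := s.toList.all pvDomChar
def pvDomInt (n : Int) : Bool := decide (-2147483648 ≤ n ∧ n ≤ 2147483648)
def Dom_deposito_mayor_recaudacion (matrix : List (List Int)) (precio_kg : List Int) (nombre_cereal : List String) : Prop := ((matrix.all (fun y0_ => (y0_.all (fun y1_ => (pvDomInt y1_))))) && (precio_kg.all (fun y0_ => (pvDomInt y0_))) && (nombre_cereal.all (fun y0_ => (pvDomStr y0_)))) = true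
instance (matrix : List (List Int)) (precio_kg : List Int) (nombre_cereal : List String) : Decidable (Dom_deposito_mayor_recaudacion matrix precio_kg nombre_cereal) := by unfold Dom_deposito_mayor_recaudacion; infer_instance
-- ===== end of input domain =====

-- B replaces A's accumulation array and flag-driven scan by a sort-based selection:
-- (index, revenue) pairs sorted by revenue descending (stable), first pair taken;
-- return values proved equal on all inputs where Python A does not raise.

-- ===== PORT A =====
def deposito_mayor_recaudacion (matrix : List (List Int)) (precio_kg : List Int) (nombre_cereal : List String) : List Int :=
  -- recaudaciones = [0] * len(matrix); nested for-loops accumulating matrix[i][j] * precio_kg[j]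
  let recaudaciones :=
    (PySem.List.pyRange 0 matrix.length 1).foldl (fun rec i =>
      (PySem.List.pyRange 0 (PySem.List.pyGetD matrix 0 []).length 1).foldl (fun rec j =>
        PySem.List.pySetD rec i (PySem.List.pyGetD rec i 0 +
          PySem.List.pyGetD (PySem.List.pyGetD matrix i []) j 0 * PySem.List.pyGetD precio_kg j 0)) rec)
      (List.replicate matrix.length 0)
  -- state: (maxima_recaudacion, bandera_maxima, deposito, mayor_recaudacion)
  let final :=
    (PySem.List.pyRange 0 recaudaciones.length 1).foldl
      (fun (st : Int × Bool × Int × List Int) i =>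
        if decide (st.1 < PySem.List.pyGetD recaudaciones i 0) || st.2.1 then
          (PySem.List.pyGetD recaudaciones i 0, false, i,
            [i, PySem.List.pyGetD recaudaciones i 0])
        else
          (st.1, st.2.1, st.2.2.1, [st.2.2.1, st.1]))
      (0, true, 0, ([] : List Int))
  final.2.2.2

-- ===== PORT B =====
def deposito_mayor_recaudacion_alt (matrix : List (List Int)) (precio_kg : List Int) (nombre_cereal : List String) : List Int :=
  if matrix = [] then []
  else
    -- cols = len(matrix[0])
    let cols := (PySem.List.pyGetD matrix 0 []).length
    -- filas = [(i, sum(x*p for x,p in zip(fila[:cols], precio_kg))) for i, fila in enumerate(matrix)]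
    let filas := (PySem.List.enumerate matrix 0).map (fun p =>
      (p.1, (((PySem.List.slice p.2 none (some (cols : Int))).zip precio_kg).map
        (fun q => q.1 * q.2)).sum))
    -- mejor = sorted(filas, key=lambda t: t[1], reverse=True)[0]
    let mejor := PySem.List.pyGetD (PySem.List.sorted filas (fun t => t.2) true) 0 (0, 0)
    [mejor.1, mejor.2]

-- ===== PRECONDITION & SPEC =====
-- Pre_ excludes exactly the inputs where Python A raises IndexError: a nonempty matrix whose
-- first row is longer than precio_kg or longer than some other row.
def Pre_deposito_mayor_recaudacion (matrix : List (List Int)) (precio_kg : List Int) (nombre_cereal : List String) : Prop :=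
  matrix = [] ∨ ((matrix.headD []).length ≤ precio_kg.length ∧
    ∀ row ∈ matrix, (matrix.headD []).length ≤ row.length)

instance (matrix : List (List Int)) (precio_kg : List Int) (nombre_cereal : List String) : Decidable (Pre_deposito_mayor_recaudacion matrix precio_kg nombre_cereal) := by unfold Pre_deposito_mayor_recaudacion; infer_instance

def pvWitness_deposito_mayor_recaudacion : List (List Int) × List Int × List String :=
  ([[1, 2], [3, 4]], [2, 1], ["trigo", "maiz"])

def Spec_deposito_mayor_recaudacion (matrix : List (List Int)) (precio_kg : List Int) (nombre_cereal : List String) (out : List Int) : Prop := out = deposito_mayor_recaudacion_alt matrix precio_kg nombre_cereal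
instance (matrix : List (List Int)) (precio_kg : List Int) (nombre_cereal : List String) (out : List Int) : Decidable (Spec_deposito_mayor_recaudacion matrix precio_kg nombre_cereal out) := by unfold Spec_deposito_mayor_recaudacion; infer_instance

-- ===== CLAIM (what is proved, stated in full; the proofs are below) =====
def Claim_equal_deposito_mayor_recaudacion : Prop := ∀ (matrix : List (List Int)) (precio_kg : List Int) (nombre_cereal : List String), Dom_deposito_mayor_recaudacion matrix precio_kg nombre_cereal → Pre_deposito_mayor_recaudacion matrix precio_kg nombre_cereal → Spec_deposito_mayor_recaudacion matrix precio_kg nombre_cereal (deposito_mayor_recaudacion matrix precio_kg nombre_cereal)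


-- ===== LEMMAS AND PROOFS =====

-- revenue of a row, index form (proof-side characterisation of both programs)
def pvRecaudacion (precio_kg : List Int) (columnas : Nat) (fila : List Int) : Int :=
  ((PySem.List.pyRange 0 columnas 1).map (fun j =>
    PySem.List.pyGetD fila j 0 * PySem.List.pyGetD precio_kg j 0)).sum

theorem pv_set_set (rec : List Int) (i : Int) (v w : Int) (hi : 0 ≤ i) :
    PySem.List.pySetD (PySem.List.pySetD rec i v) i w = PySem.List.pySetD rec i w := by
  rw [PySem.List.pySetD_of_nonneg _ _ hi, PySem.List.pySetD_of_nonneg _ _ hi,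
    PySem.List.pySetD_of_nonneg _ _ hi, List.set_set]

theorem pv_get_set_self (rec : List Int) (i : Int) (v : Int) (hi : 0 ≤ i) (h : i < (rec.length : Int)) :
    PySem.List.pyGetD (PySem.List.pySetD rec i v) i 0 = v := by
  rw [PySem.List.pySetD_of_nonneg _ _ hi,
    PySem.List.pyGetD_eq_getElem _ _ hi (by simpa using h), List.getElem_set_self]

theorem pv_set_oob (rec : List Int) (i : Int) (v : Int) (hi : 0 ≤ i) (h : ¬ i < (rec.length : Int)) :
    PySem.List.pySetD rec i v = rec := by
  rw [PySem.List.pySetD_of_nonneg _ _ hi]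
  apply List.set_eq_of_length_le
  omega

theorem pv_inner_loop (t : Int → Int) (L : List Int) :
    ∀ (rec : List Int) (i : Int), 0 ≤ i →
    L.foldl (fun r j => PySem.List.pySetD r i (PySem.List.pyGetD r i 0 + t j)) rec
      = PySem.List.pySetD rec i (PySem.List.pyGetD rec i 0 + (L.map t).sum) := by
  induction L with
  | nil =>
    intro rec i hi
    simp only [List.foldl_nil, List.map_nil, List.sum_nil, add_zero]
    by_cases h : i < (rec.length : Int)
    · rw [PySem.List.pySetD_of_nonneg _ _ hi,
        PySem.List.pyGetD_eq_getElem _ _ hi (by simpa using h), List.set_getElem_self]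
    · rw [pv_set_oob _ _ _ hi h]
  | cons a L ih =>
    intro rec i hi
    simp only [List.foldl_cons, List.map_cons, List.sum_cons]
    rw [ih _ i hi]
    by_cases h : i < (rec.length : Int)
    · rw [pv_get_set_self _ _ _ hi h, pv_set_set _ _ _ _ hi, add_assoc]
    · rw [pv_set_oob _ _ _ hi h, pv_set_oob]
      · rw [pv_set_oob _ _ _ hi h]
      · exact hi
      · exact h

theorem pv_getD_set (l : List Int) (i k : Nat) (v : Int) (hk : k < l.length) :
    (l.set i v).getD k 0 = if i = k then v else l.getD k 0 := by
  rw [List.getD_eq_getElem?_getD, List.getElem?_set, List.getD_eq_getElem?_getD]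
  split
  · next h => subst h; simp [hk]
  · rfl

theorem pv_outer_loop (f : Int → Int) (L : List Int) :
    ∀ (rec : List Int), L.Nodup → (∀ i ∈ L, 0 ≤ i) →
    (L.foldl (fun r i => PySem.List.pySetD r i (PySem.List.pyGetD r i 0 + f i)) rec).length = rec.length ∧
    ∀ k : Nat, k < rec.length →
      (L.foldl (fun r i => PySem.List.pySetD r i (PySem.List.pyGetD r i 0 + f i)) rec).getD k 0
        = if (k : Int) ∈ L then rec.getD k 0 + f k else rec.getD k 0 := by
  induction L with
  | nil => intro rec _ _; simp
  | cons a L ih =>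
    intro rec hnd hnn
    have ha : 0 ≤ a := hnn a (by simp)
    have hna : a ∉ L := by simp at hnd; exact hnd.1
    set rec' := PySem.List.pySetD rec a (PySem.List.pyGetD rec a 0 + f a) with hrec'
    have hlen' : rec'.length = rec.length := PySem.List.length_pySetD _ _ _
    obtain ⟨hlen, hget⟩ := ih rec' hnd.of_cons (fun i hi => hnn i (by simp [hi]))
    simp only [List.foldl_cons]
    refine ⟨by rw [hlen, hlen'], ?_⟩
    intro k hk
    rw [hget k (by omega)]
    have hset : rec'.getD k 0 = if a.toNat = k then PySem.List.pyGetD rec a 0 + f a else rec.getD k 0 := by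
      rw [hrec', PySem.List.pySetD_of_nonneg _ _ ha, pv_getD_set _ _ _ _ hk]
    by_cases hka : (k : Int) = a
    · have hak : a.toNat = k := by omega
      have hkL : (k : Int) ∉ L := by rw [hka]; exact hna
      have hget_a : PySem.List.pyGetD rec a 0 = rec.getD k 0 := by
        rw [PySem.List.pyGetD_eq_getElem _ _ ha (by omega), List.getD_eq_getElem _ _ hk]
        exact getElem_congr rfl hak (by omega)
      rw [if_neg hkL, if_pos (by simp [hka] : (k:Int) ∈ a :: L), hset, if_pos hak, hget_a, hka]
    · have hak : ¬ a.toNat = k := by omega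
      have hmem : ((k : Int) ∈ a :: L) ↔ ((k : Int) ∈ L) := by simp [hka]
      rw [hset]
      simp only [hak, if_false, hmem]

-- first-argmax fold (the common core of A's flag loop and of the head of B's reverse sort)
def pvBest (key : Int → Int) (L : List Int) (m : Int) : Int :=
  L.foldl (fun acc i => if key acc < key i then i else acc) m

theorem pv_selA (key : Int → Int) (L : List Int) :
    ∀ m : Int,
    L.foldl (fun (st : Int × Bool × Int × List Int) i =>
        if decide (st.1 < key i) || st.2.1 then (key i, false, i, [i, key i])
        else (st.1, st.2.1, st.2.2.1, [st.2.2.1, st.1]))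
      (key m, false, m, [m, key m])
    = (key (pvBest key L m), false, pvBest key L m, [pvBest key L m, key (pvBest key L m)]) := by
  induction L with
  | nil => intro m; simp [pvBest]
  | cons a L ih =>
    intro m
    simp only [List.foldl_cons, pvBest]
    by_cases h : key m < key a
    · simpa [pvBest, h] using ih a
    · simpa [pvBest, h] using ih m

theorem pv_best_mem (key : Int → Int) (L : List Int) :
    ∀ m : Int, pvBest key L m ∈ m :: L := by
  induction L with
  | nil => intro m; simp [pvBest]
  | cons a L ih =>
    intro m
    unfold pvBest
    simp only [List.foldl_cons]
    by_cases h : key m < key a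
    · simp only [h, if_true]
      exact List.mem_cons_of_mem m (ih a)
    · simp only [h, if_false]
      rcases List.mem_cons.mp (ih m) with h1 | h1
      · exact List.mem_cons.mpr (Or.inl h1)
      · exact List.mem_cons_of_mem m (List.mem_cons_of_mem a h1)

theorem pv_best_congr (k1 k2 : Int → Int) (L : List Int) :
    ∀ m : Int, (∀ x ∈ m :: L, k1 x = k2 x) → pvBest k1 L m = pvBest k2 L m := by
  induction L with
  | nil => intro m _; simp [pvBest]
  | cons a L ih =>
    intro m hk
    have hm := hk m (by simp)
    have ha := hk a (by simp)
    simp only [pvBest, List.foldl_cons, hm, ha]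
    by_cases h : k2 m < k2 a
    · simp only [h, if_true]
      exact ih a (fun x hx => hk x (by simp at hx ⊢; tauto))
    · simp only [h, if_false]
      exact ih m (fun x hx => hk x (by simp at hx ⊢; tauto))

-- the head of Python's stable reverse sort is the FIRST element with maximal key
theorem pv_insertBy_shape {α : Type} (key : α → Int) (x h : α) (tl : List α) :
    ∃ tl', PySem.List.insertBy (fun a b => decide (key b < key a)) x (h :: tl)
      = (if key h < key x then x else h) :: tl' := by
  by_cases hc : key h < key x
  · exact ⟨h :: tl, by simp [PySem.List.insertBy, hc]⟩
  · exact ⟨PySem.List.insertBy (fun a b => decide (key b < key a)) x tl,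
      by simp [PySem.List.insertBy, hc]⟩

theorem pv_head_sorted_rev_aux {α : Type} (key : α → Int) (L : List α) :
    ∀ (h : α) (tl : List α), ∃ tl',
      L.foldl (fun acc x => PySem.List.insertBy (fun a b => decide (key b < key a)) x acc) (h :: tl)
        = (L.foldl (fun a y => if key a < key y then y else a) h) :: tl' := by
  induction L with
  | nil => intro h tl; exact ⟨tl, rfl⟩
  | cons a L ih =>
    intro h tl
    obtain ⟨tl1, h1⟩ := pv_insertBy_shape key a h tl
    simp only [List.foldl_cons, h1]
    exact ih _ tl1

theorem pv_head_sorted_rev {α : Type} (key : α → Int) (x : α) (t : List α) :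
    ∃ tl', PySem.List.sorted (x :: t) key true
      = (t.foldl (fun a y => if key a < key y then y else a) x) :: tl' := by
  rw [PySem.List.sorted_rev_eq_foldl_insertBy]
  simpa [PySem.List.insertBy] using pv_head_sorted_rev_aux key t x []

-- the first-argmax fold over (index, revenue) pairs computes (pvBest, f pvBest)
theorem pv_fold_pairs (f : Int → Int) (t : List Int) :
    ∀ m : Int,
    (t.map (fun j => (j, f j))).foldl
        (fun (a y : Int × Int) => if a.2 < y.2 then y else a) (m, f m)
      = (pvBest f t m, f (pvBest f t m)) := by
  induction t with
  | nil => intro m; simp [pvBest]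
  | cons a t ih =>
    intro m
    simp only [List.map_cons, List.foldl_cons, pvBest]
    by_cases h : f m < f a
    · simpa [pvBest, h] using ih a
    · simpa [pvBest, h] using ih m

-- zip-form revenue = index-form revenue (under the Pre_ length bounds)
theorem pv_zip_rev (precio : List Int) (cols : Nat) (fila : List Int)
    (h1 : cols ≤ fila.length) (h2 : cols ≤ precio.length) :
    (((PySem.List.slice fila none (some (cols : Int))).zip precio).map
      (fun q => q.1 * q.2)).sum = pvRecaudacion precio cols fila := by
  rw [PySem.List.slice_to_natCast]
  unfold pvRecaudacion
  congr 1
  apply List.ext_getElem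
  · simp [PySem.List.length_pyRange_one]
    omega
  · intro k hk1 hk2
    simp only [List.getElem_map, List.getElem_zip, List.getElem_take]
    have hk : k < cols := by
      have := hk1
      simp [List.length_zip, List.length_take] at this
      exact this.1
    rw [PySem.List.getElem_pyRange_one]
    have e1 : PySem.List.pyGetD fila ((0:Int) + k) 0 = fila[k] := by
      rw [zero_add, PySem.List.pyGetD_eq_getElem _ _ (by positivity) (by exact_mod_cast lt_of_lt_of_le hk h1)]
      simp
    have e2 : PySem.List.pyGetD precio ((0:Int) + k) 0 = precio[k] := by
      rw [zero_add, PySem.List.pyGetD_eq_getElem _ _ (by positivity) (by exact_mod_cast lt_of_lt_of_le hk h2)]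
      simp
    rw [e1, e2]

theorem pv_main (matrix : List (List Int)) (precio_kg : List Int) (nombre_cereal : List String)
    (hpre : Pre_deposito_mayor_recaudacion matrix precio_kg nombre_cereal) :
    deposito_mayor_recaudacion matrix precio_kg nombre_cereal
      = deposito_mayor_recaudacion_alt matrix precio_kg nombre_cereal := by
  by_cases hm : matrix = []
  · subst hm
    simp [deposito_mayor_recaudacion, deposito_mayor_recaudacion_alt,
      PySem.List.pyRange_one_eq_nil]
  · have hn : 0 < matrix.length := List.length_pos_iff.mpr hm
    rcases hpre with h | ⟨hp1, hp2⟩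
    · exact absurd h hm
    set n := matrix.length with hnn
    set cols := (PySem.List.pyGetD matrix 0 []).length with hcols
    have hhead : (matrix.headD []).length = cols := by
      rw [hcols, PySem.List.pyGetD_zero]
      cases matrix with
      | nil => exact absurd rfl hm
      | cons a t => rfl
    set f : Int → Int := fun i => pvRecaudacion precio_kg cols (PySem.List.pyGetD matrix i []) with hf
    -- Step 1: A's first loop builds the list of row revenues
    have hfold :
        (PySem.List.pyRange 0 n 1).foldl (fun rec i =>
          (PySem.List.pyRange 0 cols 1).foldl (fun rec j =>
            PySem.List.pySetD rec i (PySem.List.pyGetD rec i 0 +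
              PySem.List.pyGetD (PySem.List.pyGetD matrix i []) j 0 * PySem.List.pyGetD precio_kg j 0)) rec)
          (List.replicate n 0)
        = (PySem.List.pyRange 0 n 1).foldl (fun r i =>
            PySem.List.pySetD r i (PySem.List.pyGetD r i 0 + f i)) (List.replicate n 0) := by
      apply PySem.List.foldl_congr_mem
      intro rec i hi
      have h0 : 0 ≤ i := (PySem.List.mem_pyRange_one.mp hi).1
      rw [pv_inner_loop _ _ rec i h0]; rfl
    -- Step 2: characterize the revenue list elementwise
    obtain ⟨hlen, hget⟩ := pv_outer_loop f (PySem.List.pyRange 0 n 1)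
      (List.replicate n 0) (PySem.List.nodup_pyRange_one 0 n)
      (fun i hi => (PySem.List.mem_pyRange_one.mp hi).1)
    set recs := (PySem.List.pyRange 0 (n:Int) 1).foldl (fun r i =>
        PySem.List.pySetD r i (PySem.List.pyGetD r i 0 + f i)) (List.replicate n 0) with hrecs
    have hlenr : recs.length = n := by rw [hrecs]; simpa using hlen
    have hgetr : ∀ k : Nat, k < n → recs.getD k 0 = f k := by
      intro k hk
      have h2 := hget k (by simpa using hk)
      have hmem : ((k : Int) ∈ PySem.List.pyRange 0 (n : Int) 1) :=
        PySem.List.mem_pyRange_one.mpr ⟨by omega, by exact_mod_cast hk⟩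
      rw [hrecs]
      simpa [hmem] using h2
    have hkey : ∀ i : Int, 0 ≤ i → i < (n : Int) → PySem.List.pyGetD recs i 0 = f i := by
      intro i h0 h1
      have hk : i.toNat < n := by omega
      rw [PySem.List.pyGetD_eq_getElem _ _ h0 (by rw [hlenr]; exact_mod_cast h1),
        ← List.getD_eq_getElem _ _ (by rw [hlenr]; exact hk), hgetr _ hk]
      exact congrArg f (Int.toNat_of_nonneg h0)
    -- Step 3: B's pair list is the index/revenue table
    have hfilas :
        (PySem.List.enumerate matrix 0).map (fun p =>
          (p.1, (((PySem.List.slice p.2 none (some (cols : Int))).zip precio_kg).map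
            (fun q => q.1 * q.2)).sum))
        = (PySem.List.pyRange 0 (n : Int) 1).map (fun j => (j, f j)) := by
      rw [PySem.List.enumerate_eq_map_pyRange (d := ([] : List Int)), List.map_map]
      apply List.map_congr_left
      intro j hj
      obtain ⟨hj0, hj1⟩ := PySem.List.mem_pyRange_one.mp hj
      have hrow : PySem.List.pyGetD matrix j [] ∈ matrix := by
        apply PySem.List.pyGetD_mem
        exact ⟨by omega, by exact_mod_cast hj1⟩
      have hlenrow : cols ≤ (PySem.List.pyGetD matrix j []).length := by
        rw [← hhead]; exact hp2 _ hrow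
    -- note: ← hnn needed so pyRange lengths line up
      simp only [Function.comp_apply]
      rw [pv_zip_rev precio_kg cols _ hlenrow (by rw [← hhead]; exact hp1)]
    -- Step 4: both selection steps compute the first argmax
    have hcast : (0 : Int) < (n : Int) := by exact_mod_cast hn
    have hsplit : PySem.List.pyRange 0 (n : Int) 1 = 0 :: PySem.List.pyRange 1 (n : Int) 1 :=
      PySem.List.pyRange_one_cons hcast
    simp only [deposito_mayor_recaudacion, deposito_mayor_recaudacion_alt, if_neg hm]
    rw [← hnn, ← hcols, hfold, hlenr, hfilas, hsplit]
    simp only [List.foldl_cons, Bool.or_true, if_true, List.map_cons]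
    rw [pv_selA (fun i => PySem.List.pyGetD recs i 0) (PySem.List.pyRange 1 (n : Int) 1) 0]
    obtain ⟨tl', htl⟩ := pv_head_sorted_rev (fun t : Int × Int => t.2) ((0 : Int), f 0)
      ((PySem.List.pyRange 1 (n : Int) 1).map (fun j => (j, f j)))
    rw [htl, PySem.List.pyGetD_zero, List.getD_cons_zero,
      pv_fold_pairs f (PySem.List.pyRange 1 (n : Int) 1) 0]
    have hagree : ∀ x ∈ (0 : Int) :: PySem.List.pyRange 1 (n : Int) 1,
        PySem.List.pyGetD recs x 0 = f x := by
      intro x hx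
      rcases List.mem_cons.mp hx with h1 | h1
      · subst h1; exact hkey 0 le_rfl hcast
      · obtain ⟨hx1, hx2⟩ := PySem.List.mem_pyRange_one.mp h1
        exact hkey x (by omega) hx2
    have hbm : pvBest (fun i => PySem.List.pyGetD recs i 0) (PySem.List.pyRange 1 (n : Int) 1) 0
        = pvBest f (PySem.List.pyRange 1 (n : Int) 1) 0 :=
      pv_best_congr _ _ _ 0 hagree
    have hmem := pv_best_mem f (PySem.List.pyRange 1 (n : Int) 1) 0
    have hbounds : 0 ≤ pvBest f (PySem.List.pyRange 1 (n : Int) 1) 0 ∧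
        pvBest f (PySem.List.pyRange 1 (n : Int) 1) 0 < (n : Int) := by
      rcases List.mem_cons.mp hmem with h1 | h1
      · rw [h1]; exact ⟨le_rfl, hcast⟩
      · obtain ⟨hx1, hx2⟩ := PySem.List.mem_pyRange_one.mp h1
        exact ⟨by omega, hx2⟩
    rw [hbm, hkey _ hbounds.1 hbounds.2]

-- ===== VERDICT =====
theorem deposito_mayor_recaudacion_spec : Claim_equal_deposito_mayor_recaudacion := by
  intro matrix precio_kg nombre_cereal _ hpre
  unfold Spec_deposito_mayor_recaudacion
  exact pv_main matrix precio_kg nombre_cereal hpre
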